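-- pv_equiv track=rewrite | github.com/deeppavlov/learning-to-learn | learning_to_learn/useful_functions.py | indent_text
-- ===== SOURCE A (Python) =====
-- def indent_text(text, indent):
--     res = ' ' * indent
--     for c in text:
--         if c == '\n':
--             res += c + ' ' * indent
--         else:
--             res += c
--     return res
-- ===== SOURCE B (Python) =====
-- def indent_text(text, indent):
--     pad = ' ' * indent
--     return '\n'.join(pad + line for line in text.split('\n'))
-- ===== Notes on version B (the rewrite author's own statement) =====
-- stated objective: idiomatic
-- what changed: B splits the text into lines once, prepends the pad to each line and joins with newlines, instead of A's character-by-character accumulation that rebuilds the string with += on every character.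
import Mathlib
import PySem

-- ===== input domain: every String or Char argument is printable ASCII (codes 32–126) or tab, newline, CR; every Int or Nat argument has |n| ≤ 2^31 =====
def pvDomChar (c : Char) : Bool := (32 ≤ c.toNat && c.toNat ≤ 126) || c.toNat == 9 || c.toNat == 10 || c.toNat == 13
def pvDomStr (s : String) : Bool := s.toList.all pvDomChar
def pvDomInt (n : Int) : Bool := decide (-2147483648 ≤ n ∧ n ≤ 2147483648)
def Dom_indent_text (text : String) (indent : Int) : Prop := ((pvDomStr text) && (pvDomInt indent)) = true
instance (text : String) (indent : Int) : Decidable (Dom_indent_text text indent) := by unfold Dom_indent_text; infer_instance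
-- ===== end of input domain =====

-- B replaces A's character-by-character accumulation with an idiomatic split-on-newline / prepend-pad / join pass.


-- ===== PORT A =====
-- res = ' ' * indent; for c in text: res += ('\n' + pad) when c is a newline, else c
def indent_text (text : String) (indent : Int) : String :=
  String.mk
    (text.toList.foldl
      (fun res c =>
        if c = '\n' then res ++ [c] ++ PySem.List.pyRepeat [' '] indent
        else res ++ [c])
      (PySem.List.pyRepeat [' '] indent))

-- ===== PORT B =====
-- pad = ' ' * indent; '\n'.join(pad + line for line in text.split('\n'))
def indent_text_alt (text : String) (indent : Int) : String :=
  String.mk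
    (PySem.Chars.join ['\n']
      ((PySem.Chars.splitOn text.toList ['\n']).map
        (fun line => PySem.List.pyRepeat [' '] indent ++ line)))

-- ===== PRECONDITION & SPEC =====
def Spec_indent_text (text : String) (indent : Int) (out : String) : Prop := out = indent_text_alt text indent
instance (text : String) (indent : Int) (out : String) : Decidable (Spec_indent_text text indent out) := by unfold Spec_indent_text; infer_instance

-- ===== CLAIM (what is proved, stated in full; the proofs are below) =====
def Claim_equal_indent_text : Prop := ∀ (text : String) (indent : Int), Dom_indent_text text indent → Spec_indent_text text indent (indent_text text indent)

-- ===== LEMMAS AND PROOFS =====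

-- clean single-character split (proof-side model of splitOn with sep = [d])
def pvSp (d : Char) : List Char → List (List Char)
  | [] => [[]]
  | c :: rest =>
    if c = d then [] :: pvSp d rest
    else
      match pvSp d rest with
      | [] => [[c]]
      | p :: ps => (c :: p) :: ps

theorem pvSp_ne_nil (d : Char) (l : List Char) : pvSp d l ≠ [] := by
  cases l with
  | nil => simp [pvSp]
  | cons c rest =>
    simp only [pvSp]
    split
    · simp
    · cases h : pvSp d rest <;> simp

theorem pvSplitOn_go_spec (d : Char) (l : List Char) :
    ∀ (fuel : Nat) (cur : List Char) (acc : List (List Char)), l.length < fuel →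
      PySem.Chars.splitOn.go [d] fuel l cur acc =
        acc.reverse ++
          (match pvSp d l with
           | [] => [cur.reverse]
           | p :: ps => (cur.reverse ++ p) :: ps) := by
  induction l with
  | nil =>
    intro fuel cur acc hf
    cases fuel with
    | zero => omega
    | succ n => simp [PySem.Chars.splitOn.go, pvSp]
  | cons c rest ih =>
    intro fuel cur acc hf
    cases fuel with
    | zero => omega
    | succ n =>
      simp only [PySem.Chars.splitOn.go]
      by_cases hcd : c = d
      · subst hcd
        have hpre : List.isPrefixOf [c] (c :: rest) = true := by
          simp [List.isPrefixOf]
        simp only [hpre, if_pos]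
        have hlen : rest.length < n := by simp at hf; omega
        rw [show List.drop (List.length [c]) (c :: rest) = rest by simp]
        rw [ih n [] (cur.reverse :: acc) hlen]
        simp only [pvSp, if_pos rfl]
        cases h : pvSp c rest with
        | nil => exact absurd h (pvSp_ne_nil c rest)
        | cons p ps => simp
      · have hpre : List.isPrefixOf [d] (c :: rest) = false := by
          simp [List.isPrefixOf]
          exact fun h => (hcd h.symm).elim
        simp only [hpre]
        have hlen : rest.length < n := by simp at hf; omega
        rw [if_neg (by simp [hpre]), ih n (c :: cur) acc hlen]
        simp only [pvSp, if_neg hcd]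
        cases h : pvSp d rest with
        | nil => exact absurd h (pvSp_ne_nil d rest)
        | cons p ps => simp

theorem pvSplitOn_eq (d : Char) (l : List Char) :
    PySem.Chars.splitOn l [d] = pvSp d l := by
  unfold PySem.Chars.splitOn
  rw [pvSplitOn_go_spec d l (l.length + 1) [] [] (by omega)]
  cases h : pvSp d l with
  | nil => exact absurd h (pvSp_ne_nil d l)
  | cons p ps => simp

-- A's loop body flattened: each char contributes f c
def pvF (pad : List Char) (c : Char) : List Char :=
  if c = '\n' then '\n' :: pad else [c]

theorem pvFoldA (pad : List Char) (l : List Char) :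
    ∀ acc : List Char,
      l.foldl (fun res c => if c = '\n' then res ++ [c] ++ pad else res ++ [c]) acc =
        acc ++ l.flatMap (pvF pad) := by
  induction l with
  | nil => intro acc; simp
  | cons c rest ih =>
    intro acc
    simp only [List.foldl_cons, List.flatMap_cons, ih]
    by_cases h : c = '\n' <;> simp [pvF, h]

theorem pvJoinB (pad : List Char) (l : List Char) :
    PySem.Chars.join ['\n'] ((pvSp '\n' l).map (fun line => pad ++ line)) =
      pad ++ l.flatMap (pvF pad) := by
  induction l with
  | nil => simp [pvSp, PySem.Chars.join, List.intercalate]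
  | cons c rest ih =>
    by_cases h : c = '\n'
    · subst h
      rw [show pvSp '\n' ('\n' :: rest) = [] :: pvSp '\n' rest from by simp [pvSp]]
      simp only [List.map_cons, List.append_nil]
      have hne : (pvSp '\n' rest).map (fun line => pad ++ line) ≠ [] := by
        cases hh : pvSp '\n' rest with
        | nil => exact absurd hh (pvSp_ne_nil _ _)
        | cons p ps => simp
      cases hm : (pvSp '\n' rest).map (fun line => pad ++ line) with
      | nil => exact absurd hm hne
      | cons q qs =>
        have : PySem.Chars.join ['\n'] (pad :: q :: qs) =
            pad ++ '\n' :: PySem.Chars.join ['\n'] (q :: qs) := by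
          simp [PySem.Chars.join, List.intercalate]
        rw [this, ← hm, ih]
        simp [pvF]
    · cases hh : pvSp '\n' rest with
      | nil => exact absurd hh (pvSp_ne_nil _ _)
      | cons p ps =>
        have key : PySem.Chars.join ['\n'] (((c :: p) :: ps).map (fun line => pad ++ line)) =
            pad ++ c :: (PySem.Chars.join ['\n'] ((p :: ps).map (fun line => pad ++ line))).drop pad.length := by
          cases ps with
          | nil => simp [PySem.Chars.join, List.intercalate]
          | cons r rs =>
            simp [PySem.Chars.join, List.intercalate]
        have ih' := ih
        rw [hh] at ih'
        simp only [pvSp, if_neg h, hh, key, ih']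
        rw [List.drop_left' rfl]
        simp [pvF, h]

-- ===== VERDICT (by name: the statement is the Claim_ definition above) =====
theorem indent_text_spec : Claim_equal_indent_text := by
  intro text indent _
  unfold Spec_indent_text indent_text indent_text_alt
  rw [pvSplitOn_eq, pvJoinB, pvFoldA]
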